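-- pv_equiv track=rewrite | github.com/pypi-data/pypi-mirror-400 | packages/constrainthg/constrainthg-0.3.1-py3-none-any.whl/constrainthg/relations.py | get_keyword_arguments
-- ===== SOURCE A (Python) =====
-- def get_keyword_arguments(args: list, kwargs: dict, excluded_keys: list):
--     """Combines all arguments except those with a given key. Returns the
--     arguments or the given keys as a dictionary and the remaining
--     arguments as a list.
--
--     Note that keys not found in `kwargs` are taken from `args` in the
--     order of the `excluded_keys` list."""
--     if not isinstance(excluded_keys, list):
--         excluded_keys = [excluded_keys]
--     exceptional_vals = {}
--     args = list(args)
--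
--     for key, val in kwargs.items():
--         if key in excluded_keys:
--             exceptional_vals[key] = val
--         else:
--             args.append(val)
--
--     try:
--         for key in excluded_keys:
--             if key not in exceptional_vals:
--                 exceptional_vals[key] = args.pop(0)
--     except IndexError:
--         pass
--
--     return args, exceptional_vals
-- ===== SOURCE B (Python) =====
-- def get_keyword_arguments(args: list, kwargs: dict, excluded_keys: list):
--     if not isinstance(excluded_keys, list):
--         excluded_keys = [excluded_keys]
--     exceptional_vals = {k: v for k, v in kwargs.items() if k in excluded_keys}
--     rest = list(args) + [v for k, v in kwargs.items() if k not in excluded_keys]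
--     missing = list(dict.fromkeys(k for k in excluded_keys if k not in exceptional_vals))
--     m = min(len(missing), len(rest))
--     exceptional_vals.update(zip(missing[:m], rest[:m]))
--     return rest[m:], exceptional_vals
-- ===== Notes on version B (the rewrite author's own statement) =====
-- stated objective: alternative
-- what changed: Replaces A's stateful pop(0)/try-except filling loop with a batch formulation: comprehensions split kwargs into excluded and remaining values, dict.fromkeys de-duplicates the still-missing excluded keys, and one zip over a counted slice assigns the first m remaining args, with args = rest[m:].
import Mathlib
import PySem

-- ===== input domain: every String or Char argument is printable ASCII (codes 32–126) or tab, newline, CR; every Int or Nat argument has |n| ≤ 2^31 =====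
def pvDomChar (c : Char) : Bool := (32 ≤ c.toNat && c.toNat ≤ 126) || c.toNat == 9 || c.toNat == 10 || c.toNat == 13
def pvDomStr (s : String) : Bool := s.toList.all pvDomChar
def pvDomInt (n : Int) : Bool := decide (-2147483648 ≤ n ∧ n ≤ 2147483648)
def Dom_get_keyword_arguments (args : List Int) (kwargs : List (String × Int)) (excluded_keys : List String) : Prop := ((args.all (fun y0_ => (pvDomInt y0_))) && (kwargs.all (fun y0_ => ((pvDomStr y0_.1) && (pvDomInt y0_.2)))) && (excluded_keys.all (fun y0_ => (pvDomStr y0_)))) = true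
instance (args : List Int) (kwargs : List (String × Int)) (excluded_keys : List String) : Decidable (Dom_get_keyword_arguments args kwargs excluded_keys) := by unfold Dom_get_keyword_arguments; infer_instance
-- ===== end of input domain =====

-- B replaces A's stateful pop(0)/try-except filling loop with a batch split + one counted zip/slice; alternative decomposition, same results.


-- ===== PORT A =====
-- the try/except pop(0) loop: popping from an empty list raises IndexError (before mutating),
-- which A catches, leaving args = [] and the keys filled so far.
def pvFillA : List String → List Int → PySem.Dict String Int → List Int × PySem.Dict String Int
  | [], args, ev => (args, ev)
  | k :: ks, args, ev =>
    if !ev.contains k then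
      match args with
      | [] => ([], ev)
      | a :: rest => pvFillA ks rest (ev.insert k a)
    else pvFillA ks args ev

def get_keyword_arguments (args : List Int) (kwargs : List (String × Int)) (excluded_keys : List String) : List Int × (List (String × Int)) :=
  let s := kwargs.foldl
    (fun (s : List Int × PySem.Dict String Int) kv =>
      if excluded_keys.contains kv.1 then (s.1, s.2.insert kv.1 kv.2)
      else (s.1 ++ [kv.2], s.2))
    (args, PySem.Dict.empty)
  let r := pvFillA excluded_keys s.1 s.2
  (r.1, r.2.items)

-- ===== PORT B =====
def get_keyword_arguments_alt (args : List Int) (kwargs : List (String × Int)) (excluded_keys : List String) : List Int × (List (String × Int)) :=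
  let exceptional_vals := PySem.Dict.ofList (kwargs.filter (fun kv => excluded_keys.contains kv.1))
  let rest := args ++ (kwargs.filter (fun kv => !excluded_keys.contains kv.1)).map Prod.snd
  let missing := PySem.List.dedup (excluded_keys.filter (fun k => !exceptional_vals.contains k))
  let m := min missing.length rest.length
  (rest.drop m, (exceptional_vals.update ((missing.take m).zip (rest.take m))).items)

-- ===== PRECONDITION & SPEC =====
-- Pre_ excludes association lists whose keys repeat: kwargs represents a Python dict, whose keys
-- are necessarily distinct, so no Python input is excluded.
def Pre_get_keyword_arguments (args : List Int) (kwargs : List (String × Int)) (excluded_keys : List String) : Prop :=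
  (kwargs.map Prod.fst).Nodup
instance (args : List Int) (kwargs : List (String × Int)) (excluded_keys : List String) : Decidable (Pre_get_keyword_arguments args kwargs excluded_keys) := by unfold Pre_get_keyword_arguments; infer_instance

def pvWitness_get_keyword_arguments : List Int × (List (String × Int)) × List String :=
  ([1, 2], [("a", 3), ("b", 4)], ["a", "c"])

def Spec_get_keyword_arguments (args : List Int) (kwargs : List (String × Int)) (excluded_keys : List String) (out : List Int × (List (String × Int))) : Prop := out = get_keyword_arguments_alt args kwargs excluded_keys
instance (args : List Int) (kwargs : List (String × Int)) (excluded_keys : List String) (out : List Int × (List (String × Int))) : Decidable (Spec_get_keyword_arguments args kwargs excluded_keys out) := by unfold Spec_get_keyword_arguments; infer_instance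

-- ===== CLAIM (what is proved, stated in full; the proofs are below) =====
def Claim_equal_get_keyword_arguments : Prop := ∀ (args : List Int) (kwargs : List (String × Int)) (excluded_keys : List String), Dom_get_keyword_arguments args kwargs excluded_keys → Pre_get_keyword_arguments args kwargs excluded_keys → Spec_get_keyword_arguments args kwargs excluded_keys (get_keyword_arguments args kwargs excluded_keys)


-- ===== LEMMAS AND PROOFS =====

-- the ordered list of excluded keys that still need a value, as the fill loop sees them:
-- `seen` starts as membership in exceptional_vals and grows with each key taken
def pvMissSpec : List String → (String → Bool) → List String
  | [], _ => []
  | k :: ks, seen => if seen k then pvMissSpec ks seen else k :: pvMissSpec ks (fun x => x == k || seen x)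

lemma pvMissSpec_seen : ∀ (ks : List String) (seen : String → Bool) (x : String),
    x ∈ pvMissSpec ks seen → seen x = false := by
  intro ks
  induction ks with
  | nil => intro seen x h; simp [pvMissSpec] at h
  | cons k ks ih =>
    intro seen x h
    simp only [pvMissSpec] at h
    by_cases hs : seen k
    · rw [if_pos hs] at h; exact ih _ _ h
    · rw [if_neg hs] at h
      rcases List.mem_cons.mp h with rfl | h
      · simpa using hs
      · have h2 := ih _ _ h
        simp only [Bool.or_eq_false_iff] at h2
        exact h2.2

lemma pvMissSpec_nodup : ∀ (ks : List String) (seen : String → Bool), (pvMissSpec ks seen).Nodup := by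
  intro ks
  induction ks with
  | nil => intro seen; simp [pvMissSpec]
  | cons k ks ih =>
    intro seen
    simp only [pvMissSpec]
    by_cases hs : seen k
    · rw [if_pos hs]; exact ih _
    · rw [if_neg hs]
      refine List.nodup_cons.mpr ⟨?_, ih _⟩
      intro hmem
      have h2 := pvMissSpec_seen _ _ _ hmem
      simp at h2

lemma pvFillA_eq : ∀ (ks : List String) (args : List Int) (ev : PySem.Dict String Int),
    pvFillA ks args ev =
      (args.drop (pvMissSpec ks (fun k => ev.contains k)).length,
       PySem.Dict.mk (ev.items ++ (pvMissSpec ks (fun k => ev.contains k)).zip args)) := by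
  intro ks
  induction ks with
  | nil => intro args ev; simp [pvFillA, pvMissSpec]
  | cons k ks ih =>
    intro args ev
    by_cases hc : ev.contains k
    · simp only [pvFillA, pvMissSpec, hc, Bool.not_true, Bool.false_eq_true, not_false_eq_true,
        if_neg, if_pos]
      exact ih args ev
    · have hcf : ev.contains k = false := by simpa using hc
      cases args with
      | nil =>
        simp [pvFillA, pvMissSpec, hcf]
      | cons a rest =>
        have hfun : (fun x => (ev.insert k a).contains x) = (fun x => x == k || ev.contains x) :=
          funext fun x => PySem.Dict.contains_insert ev k x a
        simp only [pvFillA, pvMissSpec, hcf, Bool.not_false, if_pos]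
        rw [ih rest (ev.insert k a), hfun,
          PySem.Dict.items_insert_of_not_contains ev a hcf]
        simp [List.append_assoc]

lemma pvDedupFilter : ∀ (ks : List String) (s : List String) (init : String → Bool),
    List.foldl PySem.Set.add s (ks.filter (fun k => !init k)) =
      s ++ pvMissSpec ks (fun x => init x || s.contains x) := by
  intro ks
  induction ks with
  | nil => intro s init; simp [pvMissSpec]
  | cons k ks ih =>
    intro s init
    by_cases hi : init k = true
    · rw [List.filter_cons_of_neg (by rw [hi]; decide)]
      simp only [pvMissSpec]
      rw [if_pos (by rw [hi]; rfl)]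
      exact ih s init
    · have hif : init k = false := by simpa using hi
      rw [List.filter_cons_of_pos (by rw [hif]; rfl), List.foldl_cons]
      by_cases hsk : s.contains k = true
      · have hsk' : PySem.Set.contains s k = true := hsk
        have hadd : PySem.Set.add s k = s := by unfold PySem.Set.add; rw [if_pos hsk']
        rw [hadd, ih s init]
        simp only [pvMissSpec]
        rw [if_pos (by rw [hif, hsk]; rfl)]
      · have hskf : s.contains k = false := by simpa using hsk
        have hskf' : PySem.Set.contains s k = false := hskf
        have hadd : PySem.Set.add s k = s ++ [k] := by
          unfold PySem.Set.add; rw [if_neg (by rw [hskf']; decide)]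
        rw [hadd, ih (s ++ [k]) init]
        simp only [pvMissSpec]
        rw [if_neg (by rw [hif, hskf]; decide)]
        have hfun : (fun x => init x || (s ++ [k]).contains x)
            = (fun x => x == k || (init x || s.contains x)) := by
          funext x
          by_cases hxk : x = k
          · subst hxk; simp [hif, List.contains_eq_mem]
          · simp [List.contains_eq_mem, List.mem_append, hxk, beq_iff_eq]
        rw [hfun]
        simp

lemma pvZipTake : ∀ (M : List String) (rest : List Int) (m : Nat),
    min M.length rest.length ≤ m → (M.take m).zip (rest.take m) = M.zip rest := by
  intro M
  induction M with
  | nil => intro rest m _; simp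
  | cons x M ih =>
    intro rest m hm
    cases rest with
    | nil => simp
    | cons y rest =>
      cases m with
      | zero => exact absurd hm (by simp)
      | succ m =>
        simp only [List.take_succ_cons, List.zip_cons_cons]
        rw [ih rest m (by simpa using hm)]

lemma pvLoopA (ek : List String) : ∀ (kwargs : List (String × Int)) (args : List Int) (d : PySem.Dict String Int),
    (kwargs.map Prod.fst).Nodup → (∀ p ∈ kwargs, d.contains p.1 = false) →
    kwargs.foldl
      (fun (s : List Int × PySem.Dict String Int) kv =>
        if ek.contains kv.1 then (s.1, s.2.insert kv.1 kv.2)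
        else (s.1 ++ [kv.2], s.2)) (args, d)
    = (args ++ (kwargs.filter (fun kv => !ek.contains kv.1)).map Prod.snd,
       PySem.Dict.mk (d.items ++ kwargs.filter (fun kv => ek.contains kv.1))) := by
  intro kwargs
  induction kwargs with
  | nil => intro args d _ _; simp
  | cons p kwargs ih =>
    intro args d hnd hfresh
    have hnd' : (kwargs.map Prod.fst).Nodup := (List.nodup_cons.mp (by simpa using hnd)).2
    have hp1 : p.1 ∉ kwargs.map Prod.fst := (List.nodup_cons.mp (by simpa using hnd)).1
    rw [List.foldl_cons]
    by_cases he : ek.contains p.1 = true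
    · rw [if_pos he]
      dsimp only
      have hfresh' : ∀ q ∈ kwargs, (d.insert p.1 p.2).contains q.1 = false := by
        intro q hq
        rw [PySem.Dict.contains_insert]
        have hne : q.1 ≠ p.1 := fun h => hp1 (h ▸ List.mem_map_of_mem hq)
        simp [hfresh q (List.mem_cons_of_mem _ hq), hne]
      rw [ih args (d.insert p.1 p.2) hnd' hfresh',
        PySem.Dict.items_insert_of_not_contains d p.2 (hfresh p (by simp))]
      have hem : p.1 ∈ ek := by simpa using he
      simp [hem, List.append_assoc]
    · have hef : ek.contains p.1 = false := by simpa using he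
      rw [if_neg he]
      dsimp only
      have hfresh' : ∀ q ∈ kwargs, d.contains q.1 = false :=
        fun q hq => hfresh q (List.mem_cons_of_mem _ hq)
      rw [ih (args ++ [p.2]) d hnd' hfresh']
      have hnem : p.1 ∉ ek := by simpa using hef
      simp [hnem, List.append_assoc]

-- ===== VERDICT (by name: the statement is the Claim_ definition above) =====
theorem get_keyword_arguments_spec : Claim_equal_get_keyword_arguments := by
  intro args kwargs ek _hdom hpre
  have hpre' : (kwargs.map Prod.fst).Nodup := hpre
  have hempty : ∀ p ∈ kwargs, (PySem.Dict.empty : PySem.Dict String Int).contains p.1 = false := by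
    intro p _; simp
  have hfltnodup : ((kwargs.filter (fun kv => ek.contains kv.1)).map Prod.fst).Nodup :=
    ((List.filter_sublist).map Prod.fst).nodup hpre'
  have hev : PySem.Dict.ofList (kwargs.filter (fun kv => ek.contains kv.1))
      = PySem.Dict.mk (kwargs.filter (fun kv => ek.contains kv.1)) := by
    apply PySem.Dict.ext
    have h := PySem.Dict.items_foldl_insert_fresh (kwargs.filter (fun kv => ek.contains kv.1))
      Prod.fst Prod.snd PySem.Dict.empty (by intro a _; simp) hfltnodup
    simpa [PySem.Dict.ofList, PySem.Dict.update] using h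
  have hmiss : PySem.List.dedup (ek.filter
        (fun k => !(PySem.Dict.mk (kwargs.filter (fun kv => ek.contains kv.1))).contains k))
      = pvMissSpec ek (fun k => (PySem.Dict.mk (kwargs.filter (fun kv => ek.contains kv.1))).contains k) := by
    have h := pvDedupFilter ek []
      (fun k => (PySem.Dict.mk (kwargs.filter (fun kv => ek.contains kv.1))).contains k)
    have hfun0 : (fun x => (PySem.Dict.mk (kwargs.filter (fun kv => ek.contains kv.1))).contains x
          || List.contains [] x)
        = (fun k => (PySem.Dict.mk (kwargs.filter (fun kv => ek.contains kv.1))).contains k) := by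
      funext x; simp
    rw [hfun0] at h
    simpa [PySem.List.dedup, PySem.Set.ofList, PySem.Set.empty] using h
  have hitems : (PySem.Dict.empty : PySem.Dict String Int).items = [] := rfl
  unfold Spec_get_keyword_arguments get_keyword_arguments get_keyword_arguments_alt
  simp only [pvLoopA ek kwargs args PySem.Dict.empty hpre' hempty, hev, hitems, List.nil_append,
    pvFillA_eq, hmiss]
  set flt := kwargs.filter (fun kv => ek.contains kv.1) with hflt
  set rest := args ++ (kwargs.filter (fun kv => !ek.contains kv.1)).map Prod.snd with hrest
  set M := pvMissSpec ek (fun k => (PySem.Dict.mk flt).contains k) with hM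
  set m := min M.length rest.length with hm
  refine Prod.ext ?_ ?_
  · -- first component: drop M.length = drop (min M.length rest.length)
    show rest.drop M.length = rest.drop m
    rcases Nat.le_total M.length rest.length with h | h
    · rw [show m = M.length from Nat.min_eq_left h]
    · rw [show m = rest.length from Nat.min_eq_right h,
        List.drop_eq_nil_of_le h, List.drop_length]
  · -- second component
    have hfresh : ∀ p ∈ (M.take m).zip (rest.take m),
        (PySem.Dict.mk flt).contains p.1 = false := by
      intro p hp
      have hp1 : p.1 ∈ M := List.mem_of_mem_take (List.of_mem_zip hp).1
      exact pvMissSpec_seen _ _ _ (hM ▸ hp1)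
    have hlen : (M.take m).length ≤ (rest.take m).length := by
      rw [List.length_take, List.length_take]; omega
    have hndzip : (((M.take m).zip (rest.take m)).map Prod.fst).Nodup := by
      rw [List.map_fst_zip hlen]
      exact (List.take_sublist m M).nodup (pvMissSpec_nodup _ _)
    have h := PySem.Dict.items_foldl_insert_fresh ((M.take m).zip (rest.take m))
      Prod.fst Prod.snd (PySem.Dict.mk flt) hfresh hndzip
    show flt ++ M.zip rest
        = (PySem.Dict.update (PySem.Dict.mk flt) ((M.take m).zip (rest.take m))).items
    simp only [PySem.Dict.update]
    rw [h, pvZipTake M rest m (by omega)]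
    simp
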